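-- pv_equiv track=rewrite | github.com/dh7hong/algorithms-level-facebook | 162_possible_bst.py | solution
-- ===== SOURCE A (Python) =====
-- def check(subtree):
--     if len(subtree) == 1:
--         return True
--
--     mid = len(subtree) // 2
--     root = subtree[mid]
--
--     left = subtree[:mid]
--     right = subtree[mid + 1:]
--
--     # If root is dummy (0), it cannot have real children
--     if root == '0':
--         if '1' in left or '1' in right:
--             return False
--
--     return check(left) and check(right)
--
-- def is_valid_tree(binary):
--     return check(binary)
--
-- def solution(numbers):
--     answer = []
--
--     for num in numbers:
--         binary = bin(num)[2:]  # remove '0b'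
--
--         # Find smallest full binary tree size (2^k - 1)
--         length = 1
--         while length < len(binary):
--             length = length * 2 + 1
--
--         # Pad with leading zeros
--         padded = binary.zfill(length)
--
--         answer.append(1 if is_valid_tree(padded) else 0)
--
--     return answer
-- ===== SOURCE B (Python) =====
-- def padded(num):
--     s = bin(num)[2:]
--     L = 1
--     while L < len(s):
--         L = 2 * L + 1
--     return s.zfill(L)
--
-- def no_zero_ancestor(s, i):
--     # descend from the root of the in-order complete tree to position i,
--     # checking that no strict ancestor of i is '0'
--     lo, hi = 0, len(s)
--     while True:
--         mid = (lo + hi) // 2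
--         if mid == i:
--             return True
--         if s[mid] == '0':
--             return False
--         if i < mid:
--             hi = mid
--         else:
--             lo = mid + 1
--
-- def tree_ok(s):
--     return all(no_zero_ancestor(s, i) for i in range(len(s)) if s[i] == '1')
--
-- def solution(numbers):
--     return [1 if tree_ok(padded(num)) else 0 for num in numbers]
-- ===== Notes on version B (the rewrite author's own statement) =====
-- stated objective: alternative
-- what changed: A checks validity top-down by recursively splitting the string into subtree slices and rescanning each with "'1' in left/right"; B never splits: it scans the flat string once and, for each '1' position, verifies by an iterative root-to-node binary descent that no strict ancestor is '0'.
import Mathlib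
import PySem

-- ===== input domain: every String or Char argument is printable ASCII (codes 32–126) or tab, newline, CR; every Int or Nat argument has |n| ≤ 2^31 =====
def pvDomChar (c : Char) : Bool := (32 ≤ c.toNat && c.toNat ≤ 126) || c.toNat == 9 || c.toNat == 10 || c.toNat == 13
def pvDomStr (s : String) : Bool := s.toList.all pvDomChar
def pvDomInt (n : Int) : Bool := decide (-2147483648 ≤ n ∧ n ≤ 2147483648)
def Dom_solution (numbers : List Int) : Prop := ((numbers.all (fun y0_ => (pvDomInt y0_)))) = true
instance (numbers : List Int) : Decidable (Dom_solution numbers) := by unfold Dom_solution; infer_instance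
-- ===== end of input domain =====

-- B replaces A's recursive subtree-splitting check (with its "'1' in subtree" rescans and
-- slice copies) by a flat scan that, for each '1' position, walks the root-to-node descent
-- path and rejects any '0' strict ancestor; objective: alternative.

-- ===== PORT A =====

-- port of Python's builtin bin(): '0b'+digits, '-0b'+digits for negatives, bin(0)='0b0'
def natBits (n : Nat) : List Char :=
  if n = 0 then [] else natBits (n / 2) ++ [if n % 2 = 1 then '1' else '0']

def pyBin (n : Int) : List Char :=
  if n < 0 then ['-', '0', 'b'] ++ natBits (-n).toNat
  else ['0', 'b'] ++ (if n = 0 then ['0'] else natBits n.toNat)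

-- the 'while length < len(binary): length = length*2+1' loop (textually the same in A and B)
def padLen (target : Nat) (length : Nat) : Nat :=
  if length < target then padLen target (length * 2 + 1) else length
termination_by target - length

-- A's recursive check; Python raises on the empty string, but solution never calls it on one,
-- so the len ≤ 1 base covers that unreachable case
def check (s : List Char) : Bool :=
  if s.length ≤ 1 then true
  else
    let mid := s.length / 2
    let root := s.getD mid ' '
    let left := s.take mid
    let right := s.drop (mid + 1)
    if root == '0' && (left.contains '1' || right.contains '1') then false
    else check left && check right
termination_by s.length
decreasing_by all_goals simp [List.length_take, List.length_drop]; omega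

def solution (numbers : List Int) : List Int :=
  numbers.foldl (fun answer num =>
    let binary := (pyBin num).drop 2
    let length := padLen binary.length 1
    let padded := List.replicate (length - binary.length) '0' ++ binary
    answer ++ [if check padded then 1 else 0]) []

-- ===== PORT B =====

-- B's padded(num): bin, grow length to 2^k-1, zfill
def paddedB (num : Int) : List Char :=
  let s := (pyBin num).drop 2
  let L := padLen s.length 1
  List.replicate (L - s.length) '0' ++ s

-- B's no_zero_ancestor loop; the Python loop is 'while True' and always terminates for
-- i inside [lo,hi); the fuel argument (always ≥ hi-lo at the call sites) only makes the
-- recursion total, it is never exhausted on reachable inputs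
def ancOk (s : List Char) (i : Nat) : Nat → Nat → Nat → Bool
  | _, _, 0 => true
  | lo, hi, fuel + 1 =>
    let mid := (lo + hi) / 2
    if mid = i then true
    else if s.getD mid ' ' == '0' then false
    else if i < mid then ancOk s i lo mid fuel else ancOk s i (mid + 1) hi fuel

-- all(no_zero_ancestor(s, i) for i in range(len(s)) if s[i] == '1')
def treeOk (s : List Char) : Bool :=
  (List.range s.length).all (fun i =>
    if s.getD i ' ' == '1' then ancOk s i 0 s.length (s.length + 1) else true)

def solution_alt (numbers : List Int) : List Int :=
  numbers.map (fun num => if treeOk (paddedB num) then 1 else 0)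

-- ===== PRECONDITION & SPEC =====
def Spec_solution (numbers : List Int) (out : List Int) : Prop := out = solution_alt numbers
instance (numbers : List Int) (out : List Int) : Decidable (Spec_solution numbers out) := by unfold Spec_solution; infer_instance

-- ===== CLAIM (what is proved, stated in full; the proofs are below) =====
def Claim_equal_solution : Prop := ∀ (numbers : List Int), Dom_solution numbers → Spec_solution numbers (solution numbers)

-- ===== LEMMAS AND PROOFS =====

-- a window of s read through drop/take, at an in-window index, agrees with s
theorem getD_window (s : List Char) (Δ W m : Nat) (hm : m < W) (hW : Δ + W ≤ s.length) :
    ((s.drop Δ).take W).getD m ' ' = s.getD (Δ + m) ' ' := by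
  have h1 : Δ + m < s.length := by omega
  have h2 : m < (s.drop Δ).length := by simp [List.length_drop]; omega
  rw [List.getD_eq_getElem?_getD, List.getD_eq_getElem?_getD,
      List.getElem?_take_of_lt hm, List.getElem?_drop]

-- the descent is invariant under shifting the window into a drop/take copy
theorem ancOk_shift (s : List Char) (Δ W i : Nat) :
    ∀ (f lo hi : Nat), Δ ≤ lo → hi ≤ Δ + W → Δ + W ≤ s.length → lo ≤ i → i < hi →
    ancOk s i lo hi f = ancOk ((s.drop Δ).take W) (i - Δ) (lo - Δ) (hi - Δ) f := by
  intro f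
  induction f with
  | zero => intro lo hi _ _ _ _ _; rfl
  | succ f ih =>
    intro lo hi h1 h2 h3 hlo hhi
    have e1 : (lo - Δ + (hi - Δ)) / 2 = (lo + hi) / 2 - Δ := by omega
    have hmlt : (lo + hi) / 2 < hi := by omega
    have hmge : lo ≤ (lo + hi) / 2 := by omega
    have e2 : ((s.drop Δ).take W).getD ((lo + hi) / 2 - Δ) ' ' = s.getD ((lo + hi) / 2) ' ' := by
      rw [getD_window s Δ W ((lo + hi) / 2 - Δ) (by omega) h3,
          show Δ + ((lo + hi) / 2 - Δ) = (lo + hi) / 2 from by omega]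
    simp only [ancOk, e1, e2]
    by_cases he : (lo + hi) / 2 = i
    · rw [if_pos he, if_pos (show (lo + hi) / 2 - Δ = i - Δ from by omega)]
    · rw [if_neg he, if_neg (show ¬((lo + hi) / 2 - Δ = i - Δ) from by omega)]
      by_cases h0 : s.getD ((lo + hi) / 2) ' ' == '0'
      · rw [if_pos h0, if_pos h0]
      · rw [if_neg h0, if_neg h0]
        by_cases hlt : i < (lo + hi) / 2
        · rw [if_pos hlt, if_pos (show i - Δ < (lo + hi) / 2 - Δ from by omega)]
          exact ih lo ((lo + hi) / 2) h1 (by omega) h3 hlo hlt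
        · rw [if_neg hlt, if_neg (show ¬(i - Δ < (lo + hi) / 2 - Δ) from by omega)]
          rw [ih ((lo + hi) / 2 + 1) hi (by omega) h2 h3 (by omega) hhi,
              show (lo + hi) / 2 + 1 - Δ = (lo + hi) / 2 - Δ + 1 from by omega]

-- the fuel is irrelevant as long as it exceeds the window size
theorem ancOk_fuel (s : List Char) (i : Nat) :
    ∀ (d lo hi f f' : Nat), hi - lo ≤ d → hi - lo < f → hi - lo < f' → lo ≤ i → i < hi →
    ancOk s i lo hi f = ancOk s i lo hi f' := by
  intro d
  induction d with
  | zero => intro lo hi f f' hd _ _ hlo hhi; omega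
  | succ d ih =>
    intro lo hi f f' hd hf hf' hlo hhi
    obtain ⟨f, rfl⟩ : ∃ g, f = g + 1 := ⟨f - 1, by omega⟩
    obtain ⟨f', rfl⟩ : ∃ g, f' = g + 1 := ⟨f' - 1, by omega⟩
    simp only [ancOk]
    by_cases he : (lo + hi) / 2 = i
    · rw [if_pos he, if_pos he]
    · rw [if_neg he, if_neg he]
      by_cases h0 : s.getD ((lo + hi) / 2) ' ' == '0'
      · rw [if_pos h0, if_pos h0]
      · rw [if_neg h0, if_neg h0]
        by_cases hlt : i < (lo + hi) / 2
        · rw [if_pos hlt, if_pos hlt]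
          exact ih lo ((lo + hi) / 2) f f' (by omega) (by omega) (by omega) hlo hlt
        · rw [if_neg hlt, if_neg hlt]
          exact ih ((lo + hi) / 2 + 1) hi f f' (by omega) (by omega) (by omega) (by omega) hhi

-- index-level bridges for contains / getD on take and drop
theorem all_congr' {a : Type} (l : List a) (p q : a → Bool) (h : ∀ x ∈ l, p x = q x) :
    l.all p = l.all q := by
  induction l with
  | nil => rfl
  | cons x t ih =>
    simp only [List.all_cons, h x (by simp)]
    rw [ih (fun y hy => h y (by simp [hy]))]

theorem getD_take (s : List Char) (m i : Nat) (hi : i < m) (hm : m ≤ s.length) :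
    (s.take m).getD i ' ' = s.getD i ' ' := by
  have := getD_window s 0 m i hi (by omega)
  simpa using this

theorem getD_drop (s : List Char) (m j : Nat) :
    (s.drop m).getD j ' ' = s.getD (m + j) ' ' := by
  rw [List.getD_eq_getElem?_getD, List.getD_eq_getElem?_getD, List.getElem?_drop]

theorem exists_of_contains (l : List Char) (h : l.contains '1' = true) :
    ∃ i, i < l.length ∧ l.getD i ' ' = '1' := by
  simp only [List.contains_eq_mem, decide_eq_true_eq] at h
  obtain ⟨i, hi, hg⟩ := List.mem_iff_getElem.mp h
  exact ⟨i, hi, by rw [List.getD_eq_getElem l ' ' hi, hg]⟩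

theorem getD_ne_of_not_contains (l : List Char) (h : l.contains '1' = false) (i : Nat)
    (hi : i < l.length) : (l.getD i ' ' == '1') = false := by
  simp only [List.contains_eq_mem, decide_eq_false_iff_not] at h
  rw [List.getD_eq_getElem l ' ' hi, beq_eq_false_iff_ne]
  intro e
  exact h (e ▸ List.getElem_mem hi)

-- a subtree string without '1' always passes A's check
theorem check_of_not_contains (s : List Char) (h : s.contains '1' = false) : check s = true := by
  induction s using check.induct with
  | case1 s h1 => unfold check; rw [if_pos h1]
  | case2 s h1 mid root left right hr =>
    exfalso
    have hl : (List.take (s.length / 2) s).contains '1' = false := by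
      simp only [List.contains_eq_mem, decide_eq_false_iff_not] at h ⊢
      exact fun hm => h (List.mem_of_mem_take hm)
    have hrr : (List.drop (s.length / 2 + 1) s).contains '1' = false := by
      simp only [List.contains_eq_mem, decide_eq_false_iff_not] at h ⊢
      exact fun hm => h (List.mem_of_mem_drop hm)
    rw [hl, hrr] at hr
    simp at hr
  | case3 s h1 mid root left right hr ihl ihr =>
    have hl : (List.take (s.length / 2) s).contains '1' = false := by
      simp only [List.contains_eq_mem, decide_eq_false_iff_not] at h ⊢
      exact fun hm => h (List.mem_of_mem_take hm)
    have hrr : (List.drop (s.length / 2 + 1) s).contains '1' = false := by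
      simp only [List.contains_eq_mem, decide_eq_false_iff_not] at h ⊢
      exact fun hm => h (List.mem_of_mem_drop hm)
    simp only [mid, left, right] at ihl ihr
    have hc : (s.getD (s.length / 2) ' ' == '0' &&
        ((List.take (s.length / 2) s).contains '1' ||
         (List.drop (s.length / 2 + 1) s).contains '1')) = false := by
      rw [hl, hrr]; simp
    conv_lhs => unfold check
    rw [if_neg h1, if_neg (show ¬ _ = true from by rw [hc]; exact Bool.false_ne_true),
        ihl hl, ihr hrr]
    rfl

-- main bridge: A's recursive check equals B's ancestor scan
theorem check_eq_treeOk (s : List Char) : check s = treeOk s := by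
  induction s using check.induct with
  | case1 s h1 =>
    unfold check treeOk
    rw [if_pos h1]
    interval_cases h : s.length
    · simp
    · simp only [List.range_one, List.all_cons, List.all_nil, Bool.and_true]
      split
      · simp only [ancOk]
        simp
      · rfl
  | case2 s h1 mid root left right hr =>
    -- the root is '0' and some strict subtree holds a '1': both sides are false
    simp only [mid, root, left, right] at hr
    have hroot : (s.getD (s.length / 2) ' ' == '0') = true := by
      simp only [Bool.and_eq_true] at hr; exact hr.1
    have hcont : ((List.take (s.length / 2) s).contains '1' ||
        (List.drop (s.length / 2 + 1) s).contains '1') = true := by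
      simp only [Bool.and_eq_true] at hr; exact hr.2
    -- a position of a '1' distinct from the global mid
    obtain ⟨i, hilt, hine, hg⟩ :
        ∃ i, i < s.length ∧ i ≠ s.length / 2 ∧ s.getD i ' ' = '1' := by
      rcases Bool.or_eq_true_iff.mp hcont with hc | hc
      · obtain ⟨j, hj, hgj⟩ := exists_of_contains _ hc
        have hjm : j < s.length / 2 := by
          have := hj; rw [List.length_take] at this; omega
        refine ⟨j, by omega, by omega, ?_⟩
        rw [← getD_take s (s.length / 2) j hjm (by omega)]; exact hgj
      · obtain ⟨j, hj, hgj⟩ := exists_of_contains _ hc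
        have hjm : j < s.length - (s.length / 2 + 1) := by
          have := hj; rw [List.length_drop] at this; omega
        refine ⟨s.length / 2 + 1 + j, by omega, by omega, ?_⟩
        rw [← getD_drop]; exact hgj
    have hA : check s = false := by
      conv_lhs => unfold check
      rw [if_neg h1, if_pos hr]
    have hanc : ancOk s i 0 s.length (s.length + 1) = false := by
      simp only [ancOk]
      rw [show (0 + s.length) / 2 = s.length / 2 from by omega,
          if_neg (show ¬ s.length / 2 = i from by omega), if_pos hroot]
    have hB : treeOk s = false := by
      unfold treeOk
      refine List.all_eq_false.mpr ⟨i, List.mem_range.mpr hilt, ?_⟩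
      show ¬ (if s.getD i ' ' == '1' then ancOk s i 0 s.length (s.length + 1) else true) = true
      rw [if_pos (show (s.getD i ' ' == '1') = true from by rw [hg]; rfl), hanc]
      simp
    rw [hA, hB]
  | case3 s h1 mid root left right hr ihl ihr =>
    simp only [mid, root, left, right] at hr ihl ihr
    have hcond : (s.getD (s.length / 2) ' ' == '0' &&
        ((List.take (s.length / 2) s).contains '1' ||
         (List.drop (s.length / 2 + 1) s).contains '1')) = false := by
      cases hc2 : (s.getD (s.length / 2) ' ' == '0' &&
        ((List.take (s.length / 2) s).contains '1' ||
         (List.drop (s.length / 2 + 1) s).contains '1'))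
      · rfl
      · exact absurd hc2 hr
    have hmlt : s.length / 2 < s.length := by omega
    have hlenL : (List.take (s.length / 2) s).length = s.length / 2 := by
      rw [List.length_take]; omega
    have hlenR : (List.drop (s.length / 2 + 1) s).length = s.length - (s.length / 2 + 1) :=
      List.length_drop
    have hA : check s = (check (List.take (s.length / 2) s) &&
        check (List.drop (s.length / 2 + 1) s)) := by
      conv_lhs => unfold check
      rw [if_neg h1, if_neg (show ¬ _ = true from by rw [hcond]; exact Bool.false_ne_true)]
    have hsplit : List.range s.length = (List.range (s.length / 2) ++ [s.length / 2]) ++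
        (List.range (s.length - (s.length / 2 + 1))).map (fun j => s.length / 2 + 1 + j) := by
      conv_lhs => rw [show s.length = (s.length / 2 + 1) + (s.length - (s.length / 2 + 1)) from by omega]
      rw [List.range_add, List.range_succ]
    have hmidterm : (if s.getD (s.length / 2) ' ' == '1' then
        ancOk s (s.length / 2) 0 s.length (s.length + 1) else true) = true := by
      split
      · simp only [ancOk]
        rw [if_pos (show (0 + s.length) / 2 = s.length / 2 from by omega)]
      · rfl
    have hBsplit : treeOk s =
        (((List.range (s.length / 2)).all (fun i =>
            if s.getD i ' ' == '1' then ancOk s i 0 s.length (s.length + 1) else true) &&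
          true) &&
        (List.range (s.length - (s.length / 2 + 1))).all (fun j =>
            if s.getD (s.length / 2 + 1 + j) ' ' == '1' then
              ancOk s (s.length / 2 + 1 + j) 0 s.length (s.length + 1) else true)) := by
      unfold treeOk
      rw [hsplit, List.all_append, List.all_append, List.all_map]
      simp only [List.all_cons, List.all_nil, Bool.and_true, hmidterm, Function.comp_def]
    by_cases hroot : (s.getD (s.length / 2) ' ' == '0') = true
    · -- root '0' but no '1' in either strict subtree: both sides are true
      rw [hroot] at hcond
      simp only [Bool.true_and, Bool.or_eq_false_iff] at hcond
      obtain ⟨hcl, hcr⟩ := hcond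
      rw [hA, check_of_not_contains _ hcl, check_of_not_contains _ hcr, hBsplit]
      have hgl : ∀ i ∈ List.range (s.length / 2), (if s.getD i ' ' == '1' then
          ancOk s i 0 s.length (s.length + 1) else true) = true := by
        intro i him
        have hi : i < s.length / 2 := List.mem_range.mp him
        have := getD_ne_of_not_contains _ hcl i (by omega)
        rw [getD_take s (s.length / 2) i hi (by omega)] at this
        rw [this]
        simp
      have hgr : ∀ j ∈ List.range (s.length - (s.length / 2 + 1)),
          (if s.getD (s.length / 2 + 1 + j) ' ' == '1' then
            ancOk s (s.length / 2 + 1 + j) 0 s.length (s.length + 1) else true) = true := by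
        intro j hjm
        have hj : j < s.length - (s.length / 2 + 1) := List.mem_range.mp hjm
        have := getD_ne_of_not_contains _ hcr j (by omega)
        rw [getD_drop] at this
        rw [this]
        simp
      rw [List.all_eq_true.mpr hgl, List.all_eq_true.mpr hgr]
      rfl
    · -- root is not '0': each group is the corresponding subtree's own scan
      have hroot' : (s.getD (s.length / 2) ' ' == '0') = false := by
        simpa using hroot
      have hGL : (List.range (s.length / 2)).all (fun i =>
          if s.getD i ' ' == '1' then ancOk s i 0 s.length (s.length + 1) else true) =
          treeOk (List.take (s.length / 2) s) := by
        unfold treeOk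
        rw [hlenL]
        refine all_congr' _ _ _ ?_
        intro i him
        have hi : i < s.length / 2 := List.mem_range.mp him
        rw [getD_take s (s.length / 2) i hi (by omega)]
        split
        · have step1 : ancOk s i 0 s.length (s.length + 1) =
              ancOk s i 0 (s.length / 2) s.length := by
            simp only [ancOk]
            rw [show (0 + s.length) / 2 = s.length / 2 from by omega,
                if_neg (show ¬ s.length / 2 = i from by omega),
                if_neg (show ¬ (s.getD (s.length / 2) ' ' == '0') = true from by
                  rw [hroot']; exact Bool.false_ne_true),
                if_pos hi]
          have step2 := ancOk_shift s 0 (s.length / 2) i s.length 0 (s.length / 2)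
            (by omega) (by omega) (by omega) (by omega) hi
          simp only [List.drop_zero, Nat.sub_zero] at step2
          have step3 := ancOk_fuel (List.take (s.length / 2) s) i (s.length / 2)
            0 (s.length / 2) s.length (s.length / 2 + 1)
            (by omega) (by omega) (by omega) (by omega) hi
          rw [step1, step2, step3]
        · rfl
      have hGR : (List.range (s.length - (s.length / 2 + 1))).all (fun j =>
          if s.getD (s.length / 2 + 1 + j) ' ' == '1' then
            ancOk s (s.length / 2 + 1 + j) 0 s.length (s.length + 1) else true) =
          treeOk (List.drop (s.length / 2 + 1) s) := by
        unfold treeOk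
        rw [hlenR]
        refine all_congr' _ _ _ ?_
        intro j hjm
        have hj : j < s.length - (s.length / 2 + 1) := List.mem_range.mp hjm
        rw [getD_drop]
        split
        · have step1 : ancOk s (s.length / 2 + 1 + j) 0 s.length (s.length + 1) =
              ancOk s (s.length / 2 + 1 + j) (s.length / 2 + 1) s.length s.length := by
            simp only [ancOk]
            rw [show (0 + s.length) / 2 = s.length / 2 from by omega,
                if_neg (show ¬ s.length / 2 = s.length / 2 + 1 + j from by omega),
                if_neg (show ¬ (s.getD (s.length / 2) ' ' == '0') = true from by
                  rw [hroot']; exact Bool.false_ne_true),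
                if_neg (show ¬ s.length / 2 + 1 + j < s.length / 2 from by omega)]
          have step2 := ancOk_shift s (s.length / 2 + 1) (s.length - (s.length / 2 + 1))
            (s.length / 2 + 1 + j) s.length (s.length / 2 + 1) s.length
            (by omega) (by omega) (by omega) (by omega) (by omega)
          have hdt : List.take (s.length - (s.length / 2 + 1)) (List.drop (s.length / 2 + 1) s) =
              List.drop (s.length / 2 + 1) s := by
            rw [← hlenR, List.take_length]
          rw [hdt] at step2
          rw [show s.length / 2 + 1 + j - (s.length / 2 + 1) = j from by omega,
              Nat.sub_self] at step2
          have step3 := ancOk_fuel (List.drop (s.length / 2 + 1) s) j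
            (s.length - (s.length / 2 + 1)) 0 (s.length - (s.length / 2 + 1))
            s.length (s.length - (s.length / 2 + 1) + 1)
            (by omega) (by omega) (by omega) (by omega) hj
          rw [step1, step2, step3]
        · rfl
      rw [hA, hBsplit, hGL, hGR, ihl, ihr, Bool.and_true]

-- solution appends per element from the left; stated against B's map form
theorem sol_go (xs : List Int) (acc : List Int) :
    xs.foldl (fun answer num =>
      let binary := (pyBin num).drop 2
      let length := padLen binary.length 1
      let padded := List.replicate (length - binary.length) '0' ++ binary
      answer ++ [if check padded then 1 else 0]) acc
    = acc ++ xs.map (fun num => if treeOk (paddedB num) then 1 else 0) := by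
  induction xs generalizing acc with
  | nil => simp
  | cons x t ih =>
    rw [List.foldl_cons, ih]
    simp [paddedB, check_eq_treeOk]

-- ===== VERDICT (by name: the statement is the Claim_ definition above) =====
theorem solution_spec : Claim_equal_solution := by
  intro numbers _
  unfold Spec_solution solution solution_alt
  exact sol_go numbers []
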